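-- pv_equiv track=rewrite | github.com/apepe91/SEGA2023 | UQtab_py/pce.py | generateMultiIndex
-- ===== SOURCE A (Python) =====
-- def generateMultiIndex(degree, M):
--     result = []
--
--     def generateHelper(curr, totalSum, remaining):
--         if remaining == 0:
--             result.append(curr)
--             return
--
--         for i in range(totalSum, -1, -1):
--             next_ = curr + [i]
--             generateHelper(next_, totalSum - i, remaining - 1)
--
--     generateHelper([], degree, M)
--     return result[::-1]
-- ===== SOURCE B (Python) =====
-- def generateMultiIndex(degree, M):
--     # iterative level-wise build: extend every partial tuple by one more
--     # coordinate within its remaining budget; tuples stay in lexicographic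
--     # ascending order throughout, so no reversal is needed.
--     tuples = [[]]
--     for _ in range(M):
--         tuples = [t + [i] for t in tuples for i in range(degree - sum(t) + 1)]
--     return tuples
-- ===== Notes on version B (the rewrite author's own statement) =====
-- stated objective: alternative
-- what changed: Replaces A's recursive budget-pruned DFS over the first coordinate (descending loop plus a final reversal) with an iterative level-wise comprehension that extends every partial tuple by its last coordinate in ascending order, needing no recursion and no reversal.
-- outside the precondition, e.g. on generateMultiIndex(-1, -1): A returns [], B returns [[]]
import Mathlib
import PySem

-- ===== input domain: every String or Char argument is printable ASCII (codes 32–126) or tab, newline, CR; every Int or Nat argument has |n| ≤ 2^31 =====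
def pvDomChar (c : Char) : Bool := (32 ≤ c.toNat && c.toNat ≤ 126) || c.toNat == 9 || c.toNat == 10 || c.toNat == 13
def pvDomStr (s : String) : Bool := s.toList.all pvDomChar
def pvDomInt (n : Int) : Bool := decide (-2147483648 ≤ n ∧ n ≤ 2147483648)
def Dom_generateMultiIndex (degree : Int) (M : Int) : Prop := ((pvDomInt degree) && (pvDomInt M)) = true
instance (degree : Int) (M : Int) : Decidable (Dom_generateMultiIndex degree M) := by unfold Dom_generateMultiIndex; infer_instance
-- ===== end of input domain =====

-- B replaces A's recursive reversed DFS with an iterative level-wise build of the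
-- same lexicographic list (no recursion, no reversal): an alternative of similar cost.

-- ===== PORT A =====
-- generateHelper(curr, totalSum, remaining): recursion on remaining (a Nat here;
-- the Python recursion only terminates when remaining starts ≥ 0, see Pre_).
def pvGenHelperA (curr : List Int) (totalSum : Int) : Nat → List (List Int)
  | 0 => [curr]
  | n + 1 =>
      (PySem.List.pyRange totalSum (-1) (-1)).foldl
        (fun acc i => acc ++ pvGenHelperA (curr ++ [i]) (totalSum - i) n) []

def generateMultiIndex (degree : Int) (M : Int) : List (List Int) :=
  if M < 0 then
    -- Python: for M < 0 (outside Pre_) the recursion never reaches remaining == 0;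
    -- it returns [] (empty countdown range) when degree < 0 and exhausts the stack
    -- (RecursionError) when 0 ≤ degree.
    []
  else (pvGenHelperA [] degree M.toNat).reverse   -- result[::-1]

-- ===== PORT B =====
-- tuples = [t + [i] for t in tuples for i in range(degree - sum(t) + 1)], M times
def pvStepB (degree : Int) (acc : List (List Int)) : List (List Int) :=
  acc.flatMap (fun t => (PySem.List.pyRange 0 (degree - t.sum + 1) 1).map (fun i => t ++ [i]))

def generateMultiIndex_alt (degree : Int) (M : Int) : List (List Int) :=
  (PySem.List.pyRange 0 M 1).foldl (fun acc _ => pvStepB degree acc) [[]]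

-- ===== PRECONDITION & SPEC =====
-- Pre_ excludes negative M, where Python A exhausts the stack (RecursionError) when
-- 0 ≤ degree, and when degree < 0 returns [] only by accident of its empty countdown
-- loop never reaching the base case — a corner no caller specifies (B yields [[]] there).
def Pre_generateMultiIndex (degree : Int) (M : Int) : Prop := 0 ≤ M
instance (degree : Int) (M : Int) : Decidable (Pre_generateMultiIndex degree M) := by
  unfold Pre_generateMultiIndex; infer_instance

def pvWitness_generateMultiIndex : Int × Int := (2, 3)

def Spec_generateMultiIndex (degree : Int) (M : Int) (out : List (List Int)) : Prop :=
  out = generateMultiIndex_alt degree M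
instance (degree : Int) (M : Int) (out : List (List Int)) : Decidable (Spec_generateMultiIndex degree M out) := by
  unfold Spec_generateMultiIndex; infer_instance

-- ===== CLAIM =====
def Claim_equal_generateMultiIndex : Prop := ∀ (degree : Int) (M : Int), Dom_generateMultiIndex degree M → Pre_generateMultiIndex degree M → Spec_generateMultiIndex degree M (generateMultiIndex degree M)

-- ===== LEMMAS AND PROOFS =====

-- canonical first-coordinate recursion for the lex-ordered tuples of length n, sum ≤ s
def pvT : Int → Nat → List (List Int)
  | _, 0 => [[]]
  | s, n + 1 =>
      (PySem.List.pyRange 0 (s + 1) 1).flatMap (fun i => (pvT (s - i) n).map (fun t => i :: t))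

theorem pvFoldl_stepB (degree : Int) (l : List Int) (a : List (List Int)) :
    l.foldl (fun acc _ => pvStepB degree acc) a = (pvStepB degree)^[l.length] a := by
  induction l generalizing a with
  | nil => rfl
  | cons x xs ih =>
      rw [List.foldl_cons, ih (pvStepB degree a), List.length_cons,
          Function.iterate_succ_apply]

-- A side: the reversed DFS from a prefix is the canonical list, prefixed
theorem pvCoreA (n : Nat) :
    ∀ (curr : List Int) (s : Int),
    (pvGenHelperA curr s n).reverse = (pvT s n).map (fun t => curr ++ t) := by
  induction n with
  | zero => intro curr s; simp [pvGenHelperA, pvT]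
  | succ n ih =>
      intro curr s
      rw [pvGenHelperA, PySem.List.foldl_append_eq_flatMap, List.nil_append,
          PySem.List.pyRange_neg_one_eq_reverse, List.reverse_flatMap,
          List.reverse_reverse]
      show _ = (pvT s (n + 1)).map _
      rw [pvT, List.map_flatMap]
      apply List.flatMap_congr
      intro i _
      simp only [Function.comp_apply]
      rw [ih (curr ++ [i]) (s - i), List.map_map]
      apply List.map_congr_left
      intro t _
      simp [List.append_assoc]

-- B side: one level-wise extension step advances the canonical list by one level
theorem pvStepB_T (n : Nat) : ∀ (s : Int), 0 ≤ s → pvStepB s (pvT s n) = pvT s (n + 1) := by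
  induction n with
  | zero =>
      intro s _
      show pvStepB s [[]] = pvT s 1
      simp [pvStepB, pvT, List.map_eq_flatMap]
  | succ n ih =>
      intro s hs
      rw [pvT, pvStepB, List.flatMap_assoc]
      show _ = pvT s (n + 1 + 1)
      rw [pvT]
      apply List.flatMap_congr
      intro j hj
      rw [PySem.List.mem_pyRange_one] at hj
      rw [← ih (s - j) (by omega), pvStepB, List.flatMap_map, List.map_flatMap]
      apply List.flatMap_congr
      intro u _
      simp only [List.sum_cons, List.map_map, List.cons_append]
      have : s - (j + u.sum) + 1 = s - j - u.sum + 1 := by omega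
      rw [this]
      simp [Function.comp_def]

-- B's fold reaches the canonical list (budget 0 ≤ degree)
theorem pvIterB_eq_T (degree : Int) (hd : 0 ≤ degree) (n : Nat) :
    (pvStepB degree)^[n] [[]] = pvT degree n := by
  induction n with
  | zero => rfl
  | succ n ih => rw [Function.iterate_succ_apply', ih, pvStepB_T n degree hd]

-- degree < 0: A's countdown range is empty at the first level
theorem pvGenHelperA_neg (degree : Int) (hd : degree < 0) (k : Nat) :
    pvGenHelperA [] degree (k + 1) = [] := by
  rw [pvGenHelperA, PySem.List.pyRange_neg_one_eq_nil (by omega)]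
  rfl

-- degree < 0: B's first level is empty and stays empty
theorem pvIterB_neg (degree : Int) (hd : degree < 0) (k : Nat) :
    (pvStepB degree)^[k + 1] [[]] = [] := by
  have h1 : pvStepB degree [[]] = [] := by
    have h2 : pvStepB degree [[]] = (PySem.List.pyRange 0 (degree + 1) 1).map (fun i => [i]) := by
      simp [pvStepB]
    rw [h2, PySem.List.pyRange_one_eq_nil (by omega), List.map_nil]
  have hnil : ∀ m : Nat, (pvStepB degree)^[m] [] = [] := by
    intro m
    induction m with
    | zero => rfl
    | succ m ihm => rw [Function.iterate_succ_apply, show pvStepB degree [] = [] from rfl, ihm]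
  rw [Function.iterate_succ_apply, h1, hnil]

-- ===== VERDICT =====
theorem generateMultiIndex_spec : Claim_equal_generateMultiIndex := by
  intro degree M _ hpre
  unfold Spec_generateMultiIndex generateMultiIndex generateMultiIndex_alt
  rw [if_neg (by exact not_lt.mpr hpre), pvFoldl_stepB, PySem.List.length_pyRange_one]
  have hM0 : (M - 0).toNat = M.toNat := by omega
  rw [hM0]
  by_cases hd : 0 ≤ degree
  · rw [pvIterB_eq_T degree hd, pvCoreA M.toNat [] degree]
    simp
  · cases hk : M.toNat with
    | zero => simp [pvGenHelperA]
    | succ k =>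
        rw [pvGenHelperA_neg degree (by omega) k, pvIterB_neg degree (by omega) k]
        rfl
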